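-- pv_equiv track=rewrite | github.com/MatthieuSarter/AdventOfCode | AoC_2019/Day6/__init__.py | count_orbits_for_element
-- ===== SOURCE A (Python) =====
-- def count_orbits_for_element(data, element, calculated_orbits):
--     # type: (SpaceMap, Text, Dict[Text, int]) -> int
--     '''
--     Count the number of orbited elements for a given element.
--     '''
--     if element in calculated_orbits:
--         return calculated_orbits[element]
--     if element == 'COM':
--         orbits = 0
--     else:
--         orbits = 1 + count_orbits_for_element(data, data[element], calculated_orbits)
--     calculated_orbits[element] = orbits
--     return orbits
-- ===== SOURCE B (Python) =====
-- def count_orbits_for_element(data, element, calculated_orbits):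
--     '''
--     Count the number of orbited elements for a given element.
--
--     Iterative version: walk up the parent chain collecting uncached nodes,
--     then assign counts back down the collected path.
--     '''
--     path = []
--     node = element
--     while node not in calculated_orbits and node != 'COM':
--         path.append(node)
--         node = data[node]
--     if node == 'COM' and node not in calculated_orbits:
--         base = 0
--         calculated_orbits[node] = 0
--     else:
--         base = calculated_orbits[node]
--     while path:
--         base += 1
--         calculated_orbits[path.pop()] = base
--     return base
-- ===== Notes on version B (the rewrite author's own statement) =====
-- stated objective: alternative
-- what changed: Replaces the memoized recursion by an explicit iterative two-phase pass: walk up the parent chain collecting uncached nodes into a list, then pop them back assigning base+1, base+2, ... into the cache; same return value and identical cache mutation.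
import Mathlib
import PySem

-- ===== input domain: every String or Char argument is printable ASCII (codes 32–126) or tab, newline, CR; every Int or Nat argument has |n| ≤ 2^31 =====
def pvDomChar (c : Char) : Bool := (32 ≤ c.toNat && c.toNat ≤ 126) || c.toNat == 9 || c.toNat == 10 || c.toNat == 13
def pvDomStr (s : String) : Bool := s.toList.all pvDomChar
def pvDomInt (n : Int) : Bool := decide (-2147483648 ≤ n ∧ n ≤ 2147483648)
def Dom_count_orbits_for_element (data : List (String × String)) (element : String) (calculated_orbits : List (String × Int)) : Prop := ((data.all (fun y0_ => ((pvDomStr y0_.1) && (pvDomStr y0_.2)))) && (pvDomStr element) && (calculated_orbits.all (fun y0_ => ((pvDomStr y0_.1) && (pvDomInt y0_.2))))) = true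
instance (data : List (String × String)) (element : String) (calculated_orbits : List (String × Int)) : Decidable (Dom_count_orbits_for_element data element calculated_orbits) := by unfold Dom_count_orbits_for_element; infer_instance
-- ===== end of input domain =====

-- B replaces A's memoized recursion by an iterative walk up the parent chain followed by a
-- back-assignment pass over the collected path (objective: alternative decomposition, same cost).
-- Both Pythons mutate calculated_orbits identically on Pre_; the theorems here are about the return value.

-- ===== PORT A =====
-- A's recursion, with fuel = data.length + 1 (enough for every input in Pre_: the chain of
-- distinct uncached nodes is at most that long); returns (value, updated cache).
def pvGoA (data : PySem.Dict String String) (fuel : Nat) (e : String)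
    (cache : PySem.Dict String Int) : Int × PySem.Dict String Int :=
  match fuel with
  | 0 => (0, cache)                                  -- unreachable under Pre_
  | n + 1 =>
    match cache.get? e with
    | some v => (v, cache)                           -- if element in calculated_orbits: return it
    | none =>
      if e = "COM" then (0, cache.insert e 0)        -- orbits = 0; calculated_orbits[element] = 0
      else
        match data.get? e with
        | some p =>                                  -- orbits = 1 + count_orbits_for_element(data, data[element], …)
          let r := pvGoA data n p cache
          (1 + r.1, (r.2).insert e (1 + r.1))        -- calculated_orbits[element] = orbits
        | none => (0, cache)                         -- KeyError: excluded by Pre_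

def count_orbits_for_element (data : List (String × String)) (element : String) (calculated_orbits : List (String × Int)) : Int :=
  (pvGoA (PySem.Dict.ofList data) (data.length + 1) element (PySem.Dict.ofList calculated_orbits)).1

-- ===== PORT B =====
-- first loop: while node not in calculated_orbits and node != 'COM': path.append(node); node = data[node]
def pvWalkB (data : PySem.Dict String String) (cache : PySem.Dict String Int)
    (fuel : Nat) (node : String) (path : List String) : String × List String :=
  match fuel with
  | 0 => (node, path)                                -- unreachable under Pre_
  | n + 1 =>
    if (cache.get? node).isNone ∧ node ≠ "COM" then
      match data.get? node with
      | some p => pvWalkB data cache n p (path ++ [node])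
      | none => (node, path)                         -- KeyError: excluded by Pre_
    else (node, path)

def count_orbits_for_element_alt (data : List (String × String)) (element : String) (calculated_orbits : List (String × Int)) : Int :=
  let d := PySem.Dict.ofList data
  let cache := PySem.Dict.ofList calculated_orbits
  let w := pvWalkB d cache (data.length + 1) element []
  let node := w.1
  let bc :=
    if node = "COM" ∧ (cache.get? node).isNone then ((0 : Int), cache.insert node 0)
    else (cache.getD node 0, cache)                  -- base = calculated_orbits[node] (cached under Pre_)
  -- while path: base += 1; calculated_orbits[path.pop()] = base   (pop = take from the end)
  (w.2.reverse.foldl (fun (s : Int × PySem.Dict String Int) nd => (s.1 + 1, s.2.insert nd (s.1 + 1))) bc).1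

-- ===== PRECONDITION & SPEC =====
-- Pre_: the parent chain from element reaches 'COM' or an already-cached node, every step being a
-- key of data (otherwise Python A raises KeyError, or RecursionError on a cycle). data.length + 1
-- steps always suffice, since the nodes visited before termination are distinct keys of data.
def pvReaches (data : PySem.Dict String String) (cache : PySem.Dict String Int)
    (fuel : Nat) (e : String) : Bool :=
  match fuel with
  | 0 => false
  | n + 1 =>
    if (cache.get? e).isSome ∨ e = "COM" then true
    else
      match data.get? e with
      | some p => pvReaches data cache n p
      | none => false

def Pre_count_orbits_for_element (data : List (String × String)) (element : String) (calculated_orbits : List (String × Int)) : Prop :=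
  pvReaches (PySem.Dict.ofList data) (PySem.Dict.ofList calculated_orbits) (data.length + 1) element = true
instance (data : List (String × String)) (element : String) (calculated_orbits : List (String × Int)) : Decidable (Pre_count_orbits_for_element data element calculated_orbits) := by unfold Pre_count_orbits_for_element; infer_instance

def pvWitness_count_orbits_for_element : (List (String × String)) × String × (List (String × Int)) :=
  ([("B", "COM"), ("C", "B")], "C", [("D", 7)])

def Spec_count_orbits_for_element (data : List (String × String)) (element : String) (calculated_orbits : List (String × Int)) (out : Int) : Prop := out = count_orbits_for_element_alt data element calculated_orbits
instance (data : List (String × String)) (element : String) (calculated_orbits : List (String × Int)) (out : Int) : Decidable (Spec_count_orbits_for_element data element calculated_orbits out) := by unfold Spec_count_orbits_for_element; infer_instance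

-- ===== CLAIM (what is proved, stated in full; the proofs are below) =====
def Claim_equal_count_orbits_for_element : Prop := ∀ (data : List (String × String)) (element : String) (calculated_orbits : List (String × Int)), Dom_count_orbits_for_element data element calculated_orbits → Pre_count_orbits_for_element data element calculated_orbits → Spec_count_orbits_for_element data element calculated_orbits (count_orbits_for_element data element calculated_orbits)

-- ===== LEMMAS AND PROOFS =====

-- the base value B assigns at the stop node, as a function of the stop node
def pvBaseOf (cache : PySem.Dict String Int) (node : String) : Int :=
  if node = "COM" ∧ (cache.get? node).isNone then 0 else cache.getD node 0

-- the back-assignment fold increments the running count once per path element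
theorem pvFold_fst (l : List String) (p : Int × PySem.Dict String Int) :
    ((l.foldl (fun (s : Int × PySem.Dict String Int) nd => (s.1 + 1, s.2.insert nd (s.1 + 1))) p).1)
      = p.1 + l.length := by
  induction l generalizing p with
  | nil => simp
  | cons x xs ih => simp [List.foldl, ih]; omega

-- core invariant: along a chain that reaches COM/cache, B's walk result determines A's value
theorem pvWalk_goA (data : PySem.Dict String String) (cache : PySem.Dict String Int)
    (fuel : Nat) (e : String) (path : List String)
    (h : pvReaches data cache fuel e = true) :
    pvBaseOf cache (pvWalkB data cache fuel e path).1
      + ((pvWalkB data cache fuel e path).2.length : Int) - path.length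
      = (pvGoA data fuel e cache).1 := by
  induction fuel generalizing e path with
  | zero => simp [pvReaches] at h
  | succ n ih =>
    by_cases hc : (cache.get? e).isSome
    · -- cached: both stop at once
      obtain ⟨v, hv⟩ := Option.isSome_iff_exists.mp hc
      simp [pvWalkB, pvGoA, hv, pvBaseOf, PySem.Dict.getD_eq_get?_getD]
    · have hnone : cache.get? e = none := Option.not_isSome_iff_eq_none.mp hc
      by_cases hcom : e = "COM"
      · subst hcom
        simp [pvWalkB, pvGoA, hnone, pvBaseOf]
      · -- uncached, not COM: one step up
        simp only [pvReaches, hnone, Option.isSome_none, Bool.false_eq_true, false_or,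
          hcom, if_false] at h
        cases hp : data.get? e with
        | none => simp [hp] at h
        | some p =>
          rw [hp] at h
          have := ih p (path ++ [e]) h
          simp only [pvWalkB, pvGoA, hnone, hcom, hp, Option.isNone_none, ne_eq,
            not_false_iff, and_true, if_true]
          simp only [List.length_append, List.length_cons, List.length_nil] at this ⊢
          push_cast at this ⊢
          omega

-- ===== VERDICT (by name: the statement is the Claim_ definition above) =====
theorem count_orbits_for_element_spec : Claim_equal_count_orbits_for_element := by
  intro data element calculated_orbits _hdom hpre
  unfold Spec_count_orbits_for_element count_orbits_for_element count_orbits_for_element_alt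
  dsimp only
  have h := pvWalk_goA (PySem.Dict.ofList data) (PySem.Dict.ofList calculated_orbits)
    (data.length + 1) element [] hpre
  simp only [List.length_nil, Int.natCast_zero, sub_zero] at h
  rw [← h, pvFold_fst]
  simp only [List.length_reverse]
  by_cases hb : (pvWalkB (PySem.Dict.ofList data) (PySem.Dict.ofList calculated_orbits)
        (data.length + 1) element []).1 = "COM" ∧
      ((PySem.Dict.ofList calculated_orbits).get?
        (pvWalkB (PySem.Dict.ofList data) (PySem.Dict.ofList calculated_orbits)
          (data.length + 1) element []).1).isNone
  · rw [if_pos hb]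
    have h2 : (PySem.Dict.ofList calculated_orbits).get? "COM" = none := by
      have := Option.isNone_iff_eq_none.mp hb.2; rwa [hb.1] at this
    simp [pvBaseOf, hb.1, h2]
  · rw [if_neg hb]; simp only [pvBaseOf, if_neg hb]
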